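/- GENERATED by tools/from_farm_form.py from prooffarm-gif/accepted/DGifDecompressLine.3/Lemmas.lean (a worked proof of the farm's unit `DGifDecompressLine.3`,
   accepted by the verdict) — do not edit. -/
import Gif.Spec.Units.DGifDecompressLine_3
import Gif.Spec.AllSegs

/-!
  Lemmas for the unit `DGifDecompressLine.3` (segment 3 of the LZW decoder: the head of the main loop, the call of
  `DGifDecompressInput(GifFile, &CrntCode)` with its two outcomes, and the write-back of l.999-1002).

  The state facts are proved over ABSTRACT states (no walk inside): the walks of the unit (at the end of the file) only apply them.

      dl3_call_pre          the callee's precondition at its entry state (only the return address was pushed since `Head`)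
      dl3_after_call        what holds when the callee has returned: `Body` and `Locals` again (from the callee's `Back`, its
                            `LZOK`, and its footprint: the constant slots of the function are not in it), the result is a boolean,
                            and GIF_OK gives `CrntCode ≤ 4095` and a smaller measure
      dl3_writeback         `Body` behind the two stores `Private->LastCode = LastCode; Private->StackPtr = StackPtr` (l.999-1000)
      dl3_lt_of_branch      the branch fact of `cmp ebp, eax ; jge` not taken, as `i < LineLen`
      dl3_AtRet             the unit's own cut at the call's return address 106F98H (`ret33`)
      dl3_seg_head          106F7DH … the call … 106F98H, and 106F7DH … 107080H … 10709DH
      dl3_seg_tail          106F98H … 106FA0H (GIF_OK) and 106F98H … 1070BAH … 10709DH (GIF_ERROR)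
-/

open X86 X86.User Asan ProgX.Base ProgX.Base.Spec Gif.Spec

set_option maxRecDepth 4000
set_option maxHeartbeats 4000000

namespace Gif.Spec.DGifDecompressLine_3

/-- **THE PRECONDITION OF `DGifDecompressInput(GifFile, &CrntCode)`** at the callee's entry state `s` (106F93H, l.889): since the
state `v` of the cut only the call's return address was pushed (`[RA − 208, RA − 200)`, below the body's stack pointer): the
environment for the frame list with the own frame in front (`Env.at_call`), `LZOK` still, `rdi = gif`, and `rsi = &CrntCode`, the
object of the function's own protected frame (`OutPtr.own`). -/
theorem dl3_call_pre {cut : Word} {H : Heap} {rest : List Obj} {frames : List (Nat × FrameLayout)} {F : Forest} {R : Rd} {n : Nat}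
    {u₀ e : State} {ret : Word} {v : State}
    (hbody : DGifDecompressLine.Body cut H rest frames F R n u₀ e ret v)
    (s : State) (x : Nat)
    (w_mem : s.mem = v.mem.writeLE (e.reg .rsp - 208) 8 x)
    (w_rsp : s.reg .rsp = e.reg .rsp - 208)
    (w_rsi : s.reg .rsi = e.reg .rsp - 88)
    (w_rdi : s.reg .rdi = UInt64.ofNat F.gif) :
    (DGifDecompressInput.spec H rest (DGifDecompressLine.framesIn frames e) F R).pre s := by
  have he_room : 0x700000 + 560 ≤ (e.reg .rsp).toNat := hbody.entry.room
  have he_top : (e.reg .rsp).toNat + 8 ≤ 0x800000 := hbody.entry.top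
  have he_align : (e.reg .rsp).toNat % 8 = 0 := hbody.entry.align
  have henv : Env H rest frames F R e := hbody.pre.1
  have hg1 : 0x800040 ≤ F.gif := hbody.gif_inside.1
  have hg2 : F.gif + 152 ≤ 0xC00000 := hbody.gif_inside.2.1
  have hp1 : 0x800040 ≤ F.pv := hbody.pv_inside.1
  have hp2 : F.pv + 24968 ≤ 0xC00000 := hbody.pv_inside.2.1
  -- only the return address was pushed
  have hs : Mem.SameExcept [⟨(e.reg .rsp).toNat - 560, (e.reg .rsp).toNat - 200⟩] v.mem s.mem := by
    rw [w_mem]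
    u_same
  -- the environment for the frame list with the own frame in front
  have henv' : Env H rest (DGifDecompressLine.framesIn frames e) F R s := by
    refine henv.at_call hbody.inv hbody.ok hs (by omega) (by omega) ?_ ?_ ?_
    · rw [w_rsp]
      u_omega
    · rw [w_rsp]
      u_omega
    · rw [w_rsp]
      u_omega
  -- the LZW field ranges: the store is on the stack
  have hlz : LZOK s.mem F.pv := by
    apply hbody.lz.sameExcept hs (by omega)
    intro w hw
    have ew := List.mem_singleton.mp hw
    rw [ew]
    simp only
    omega
  -- `&CrntCode`: the object of the own frame (base + 32, 4 bytes), named by its numbers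
  have ho : (⟨(e.reg .rsp).toNat - 120 + 32, 4, .stack⟩ : Obj) ∈
      Gif.Frames.DGifDecompressLine.objsAt ((e.reg .rsp).toNat - 120) := List.mem_cons_self
  have hsz : Gif.Frames.DGifDecompressLine.size = 64 := rfl
  have hb : (e.reg .rsp).toNat - 120 + Gif.Frames.DGifDecompressLine.size ≤ (e.reg .rsp).toNat + 8 := by
    rw [hsz]
    omega
  have ersi : (s.reg .rsi).toNat = (e.reg .rsp).toNat - 120 + 32 := by
    rw [w_rsi]
    u_omega
  have hout : OutPtr H rest (DGifDecompressLine.framesIn frames e) F R (s.reg .rsi).toNat 4 := by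
    rw [ersi]
    exact OutPtr.own henv.heap henv.ctx hbody.inv hb ho
  refine ⟨henv', hlz, ?_, hout⟩
  rw [w_rdi]
  exact toNat_ofNat_addr F.gif (by omega)

/-- **`DGifDecompressInput(GifFile, &CrntCode)` HAS RETURNED** (106F98H, l.889). `s0` is the callee's entry state (the return address
pushed since the cut's state `v`), `s1` the returned state with the callee's footprint `w_same` and post `w_post`. The callee wrote
its stack (below the body's stack pointer), `CrntCode` (`[RA − 88, RA − 84)`), `[pv + 20, pv + 32)`, `[pv + 44, pv + 56)`, `Buf`,
`gif.Error`, the cursor: NONE of the constant slots of the function, not `ClearCode` / `EOFCode`. So `Body` (its `inv`, `ok`, `lz`,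
`rem` from the callee's `Back` and `LZOK`) and `Locals` hold again; the result is a boolean; GIF_OK: `CrntCode ≤ 4095` and the
measure of the main loop went down (the measure at `s0` is the measure at `v`). -/
theorem dl3_after_call {cut cut' : Word} {H : Heap} {rest : List Obj} {frames : List (Nat × FrameLayout)} {F : Forest} {R : Rd}
    {n : Nat} {u₀ e : State} {ret : Word} {v : State}
    (hbody : DGifDecompressLine.Body cut H rest frames F R n u₀ e ret v) (hloc : DGifDecompressLine.Locals F e v)
    (s0 s1 : State) (x : Nat)
    (w_mem_0 : s0.mem = v.mem.writeLE (e.reg .rsp - 208) 8 x)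
    (w_rsp_0 : s0.reg .rsp = e.reg .rsp - 208)
    (w_rsi_0 : s0.reg .rsi = e.reg .rsp - 88)
    (w_same : Mem.SameExcept ((DGifDecompressInput.spec H rest (DGifDecompressLine.framesIn frames e) F R).footprint s0)
      s0.mem s1.mem)
    (w_post : (DGifDecompressInput.spec H rest (DGifDecompressLine.framesIn frames e) F R).post s0 s1)
    (w_rip : s1.rip = cut') (w_rsp : s1.reg .rsp = e.reg .rsp - 200)
    (w_code : (conv u₀).code.In s1.mem) (w_inv : (conv u₀).inv s1) :
    DGifDecompressLine.Body cut' H rest frames F R n u₀ e ret s1 ∧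
    DGifDecompressLine.Locals F e s1 ∧
    IsBool s1 ∧
    ((s1.reg .rax).toNat = 1 →
      rd s1.mem ((e.reg .rsp).toNat - 88) 4 ≤ 4095 ∧ mu R s1.mem F.pv + 1 ≤ mu R v.mem F.pv) := by
  have he_room : 0x700000 + 560 ≤ (e.reg .rsp).toNat := hbody.entry.room
  have he_top : (e.reg .rsp).toNat + 8 ≤ 0x800000 := hbody.entry.top
  have henv : Env H rest frames F R e := hbody.pre.1
  have hg1 : 0x800040 ≤ F.gif := hbody.gif_inside.1
  have hg2 : F.gif + 152 ≤ 0xC00000 := hbody.gif_inside.2.1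
  have hp1 : 0x800040 ≤ F.pv := hbody.pv_inside.1
  have hp2 : F.pv + 24968 ≤ 0xC00000 := hbody.pv_inside.2.1
  have hfar := hbody.gif_pv_far
  have hcur := henv.ctx.cursor_range henv.heap.inv.shadow
  obtain ⟨hback, hlz, hbool, hok1⟩ := w_post
  -- the callee's footprint as numbers
  have e208 : (e.reg .rsp - 208).toNat = (e.reg .rsp).toNat - 208 := by u_omega
  have e88 : (e.reg .rsp - 88).toNat = (e.reg .rsp).toNat - 88 := by u_omega
  simp only [X86.User.Spec.footprint, vspec, w_rsp_0, w_rsi_0, e208, e88] at w_same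
  -- since `v`: the pushed return address …
  have hs0 : Mem.SameExcept [⟨(e.reg .rsp).toNat - 560, (e.reg .rsp).toNat - 200⟩] v.mem s0.mem := by
    rw [w_mem_0]
    u_same
  -- … and the callee's footprint
  have hs : Mem.SameExcept
      [⟨(e.reg .rsp).toNat - 560, (e.reg .rsp).toNat - 200⟩,
       ⟨(e.reg .rsp).toNat - 88, (e.reg .rsp).toNat - 84⟩,
       ⟨F.pv + 20, F.pv + 32⟩,
       ⟨F.pv + 44, F.pv + 56⟩,
       ⟨F.pv + 88, F.pv + 344⟩,
       ⟨F.gif + 96, F.gif + 100⟩,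
       ⟨R.cur, R.cur + 8⟩] v.mem s1.mem := by
    refine Mem.SameExcept.step_same' (Mem.SameExcept.step_same' (Mem.SameExcept.refl _ _) hs0 ?_) w_same ?_
    · simp only [List.forall_mem_cons, List.not_mem_nil, false_imp_iff, implies_true, and_true, inSpans_cons, inSpans_nil]
      omega
    · simp only [List.forall_mem_cons, List.not_mem_nil, false_imp_iff, implies_true, and_true, inSpans_cons, inSpans_nil]
      omega
  -- every window written misses the constant slots of the function's stack and the return-address slot
  have hslots : ∀ a k : Nat,
      (((e.reg .rsp).toNat - 200 ≤ a ∧ a + k ≤ (e.reg .rsp).toNat - 88) ∨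
       ((e.reg .rsp).toNat - 84 ≤ a ∧ a + k ≤ (e.reg .rsp).toNat + 8)) →
      ∀ w, w ∈
        [(⟨(e.reg .rsp).toNat - 560, (e.reg .rsp).toNat - 200⟩ : Span),
         ⟨(e.reg .rsp).toNat - 88, (e.reg .rsp).toNat - 84⟩,
         ⟨F.pv + 20, F.pv + 32⟩,
         ⟨F.pv + 44, F.pv + 56⟩,
         ⟨F.pv + 88, F.pv + 344⟩,
         ⟨F.gif + 96, F.gif + 100⟩,
         ⟨R.cur, R.cur + 8⟩] → a + k ≤ w.lo ∨ w.hi ≤ a := by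
    intro a k hak
    simp only [List.forall_mem_cons, List.not_mem_nil, false_imp_iff, implies_true, and_true]
    omega
  -- the measures at the callee's entry are those at `v`: the return address is on the stack
  have hrem0 : Gif.Spec.rem R s0.mem = Gif.Spec.rem R v.mem := by
    apply rem_sameExcept hs0 (by omega)
    simp only [List.forall_mem_cons, List.not_mem_nil, false_imp_iff, implies_true, and_true]
    omega
  have hmu0 : mu R s0.mem F.pv = mu R v.mem F.pv := by
    apply mu_sameExcept hs0 (by omega) (by omega)
    · simp only [List.forall_mem_cons, List.not_mem_nil, false_imp_iff, implies_true, and_true]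
      omega
    · simp only [List.forall_mem_cons, List.not_mem_nil, false_imp_iff, implies_true, and_true]
      omega
    · simp only [List.forall_mem_cons, List.not_mem_nil, false_imp_iff, implies_true, and_true]
      omega
  -- the heap's invariant comes back with the clean stack at the callee's `rsp + 8` = the body's `rsp`
  have e_top : (s0.reg .rsp).toNat + 8 = (e.reg .rsp).toNat - 200 := by
    rw [w_rsp_0, e208]
    omega
  have hinv1 : HeapInv H rest (DGifDecompressLine.framesIn frames e) ((e.reg .rsp).toNat - 200) s1.mem := by
    rw [← e_top]
    exact hback.inv
  -- the footprint since the entry: every window lies inside one of the contract's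
  have hsameE : Mem.SameExcept
      [⟨(e.reg .rsp).toNat - 560, (e.reg .rsp).toNat⟩,
       shadowSpan ((e.reg .rsp).toNat - 120) ((e.reg .rsp).toNat - 56),
       ⟨(e.reg .rsi).toNat, (e.reg .rsi).toNat + n⟩,
       ⟨F.pv + 20, F.pv + 56⟩,
       ⟨F.pv + 88, F.pv + 344⟩,
       ⟨F.pv + 344, F.pv + 4439⟩,
       ⟨F.pv + 4439, F.pv + 8535⟩,
       ⟨F.pv + 8536, F.pv + 24920⟩,
       ⟨F.gif + 96, F.gif + 100⟩,
       ⟨R.cur, R.cur + 8⟩] e.mem s1.mem := by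
    apply Mem.SameExcept.step_same' hbody.same hs
    simp only [List.forall_mem_cons, List.not_mem_nil, false_imp_iff, implies_true, and_true, inSpans_cons, inSpans_nil]
    omega
  -- the two fields of pv that `Locals` mentions
  have e_clear : GifFilePrivateType.ClearCode s1.mem F.pv = GifFilePrivateType.ClearCode v.mem F.pv := by
    simp only [gfield]
    apply hs.rd (F.pv + 12) 4 (by omega)
    simp only [List.forall_mem_cons, List.not_mem_nil, false_imp_iff, implies_true, and_true]
    omega
  have e_eof : GifFilePrivateType.EOFCode s1.mem F.pv = GifFilePrivateType.EOFCode v.mem F.pv := by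
    simp only [gfield]
    apply hs.rd (F.pv + 16) 4 (by omega)
    simp only [List.forall_mem_cons, List.not_mem_nil, false_imp_iff, implies_true, and_true]
    omega
  refine ⟨⟨hbody.entry, hbody.pre, hbody.apart, w_rip, w_rsp, ?_, ?_, ?_, ?_, ?_, ?_, ?_, ?_, ?_, ?_, hinv1, hback.ok, hlz, ?_,
    hsameE, w_code, w_inv⟩, ⟨?_, ?_, ?_, ?_, ?_⟩, hbool, ?_⟩
  · exact slot_sameExcept hs (e.reg .rsp) 8 8 _ (by omega) (by omega) hbody.slot_r15 (hslots _ _ (by omega))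
  · exact slot_sameExcept hs (e.reg .rsp) 16 8 _ (by omega) (by omega) hbody.slot_r14 (hslots _ _ (by omega))
  · exact slot_sameExcept hs (e.reg .rsp) 24 8 _ (by omega) (by omega) hbody.slot_r13 (hslots _ _ (by omega))
  · exact slot_sameExcept hs (e.reg .rsp) 32 8 _ (by omega) (by omega) hbody.slot_r12 (hslots _ _ (by omega))
  · exact slot_sameExcept hs (e.reg .rsp) 40 8 _ (by omega) (by omega) hbody.slot_rbp (hslots _ _ (by omega))
  · exact slot_sameExcept hs (e.reg .rsp) 48 8 _ (by omega) (by omega) hbody.slot_rbx (hslots _ _ (by omega))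
  · rw [hs.readLE (e.reg .rsp) 8 (by omega) (hslots _ _ (by omega))]
    exact hbody.slot_ra
  · exact slot_sameExcept hs (e.reg .rsp) 168 8 _ (by omega) (by omega) hbody.s_gif (hslots _ _ (by omega))
  · exact slot_sameExcept hs (e.reg .rsp) 160 4 _ (by omega) (by omega) hbody.s_len (hslots _ _ (by omega))
  · exact slot_sameExcept hs (e.reg .rsp) 152 8 _ (by omega) (by omega) hbody.s_line (hslots _ _ (by omega))
  · -- the reader did not go back
    have h1 := hback.rem
    have h2 := hbody.rem
    omega
  · exact slot_sameExcept hs (e.reg .rsp) 192 8 _ (by omega) (by omega) hloc.s_stack (hslots _ _ (by omega))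
  · rw [e_clear]
    exact slot_sameExcept hs (e.reg .rsp) 184 4 _ (by omega) (by omega) hloc.s_clear (hslots _ _ (by omega))
  · exact slot_sameExcept hs (e.reg .rsp) 176 8 _ (by omega) (by omega) hloc.s_suffix (hslots _ _ (by omega))
  · rw [e_eof]
    exact slot_sameExcept hs (e.reg .rsp) 156 4 _ (by omega) (by omega) hloc.s_eof (hslots _ _ (by omega))
  · exact slot_sameExcept hs (e.reg .rsp) 128 8 _ (by omega) (by omega) hloc.s_shadow (hslots _ _ (by omega))
  · -- GIF_OK: the code is a 12-bit code, the measure went down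
    intro h1
    obtain ⟨hc, hm⟩ := hok1 h1
    rw [w_rsi_0, e88] at hc
    rw [hmu0] at hm
    exact ⟨hc, hm⟩

/-- **BEHIND THE WRITE-BACK OF l.999-1000** (107089H `Private->LastCode = LastCode`, 10708DH `Private->StackPtr = StackPtr`; the
two stores carry no check call: gcc proved them redundant with the checked loads of Segment 1): two windows of the LZW scalars
`[pv + 20, pv + 44)` (`ScratchLz`), so `Body.carry_lz` gives `Body` again once `LZOK` holds of the new memory: the fields
`[pv + 8, pv + 32)` and `CrntShiftState` are untouched, `LastCode` has no clause, and [LZ5] is `StackPtr = ebx ≤ 4095` (`Main.rbx`). -/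
theorem dl3_writeback {cut cut' : Word} {H : Heap} {rest : List Obj} {frames : List (Nat × FrameLayout)} {F : Forest} {R : Rd}
    {n : Nat} {u₀ e : State} {ret : Word} {v : State}
    (hbody : DGifDecompressLine.Body cut H rest frames F R n u₀ e ret v)
    (h_r14 : (v.reg .r14).toNat = F.pv) (h_rbx : (v.reg .rbx).toNat ≤ 4095)
    (s : State) (x : Nat)
    (w_mem : s.mem = (v.mem.writeLE (v.reg .r14 + 32) 4 x).writeLE (v.reg .r14 + 40) 4 (Word.part .w32 (v.reg .rbx)).toNat)
    (w_rip : s.rip = cut') (w_rsp : s.reg .rsp = e.reg .rsp - 200)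
    (w_eq : Mem.EqOn ProgX.Base.L.textLo ProgX.Base.L.textHi u₀.mem s.mem) (habi : (conv u₀).inv s) :
    DGifDecompressLine.Body cut' H rest frames F R n u₀ e ret s := by
  have hp1 : 0x800040 ≤ F.pv := hbody.pv_inside.1
  have hp2 : F.pv + 24968 ≤ 0xC00000 := hbody.pv_inside.2.1
  -- where the two stores go, as numbers
  have e32 : (v.reg .r14 + 32).toNat = F.pv + 32 := by u_omega
  have e40 : (v.reg .r14 + 40).toNat = F.pv + 40 := by u_omega
  -- the footprint of the two stores
  have hs : Mem.SameExcept [⟨F.pv + 32, F.pv + 36⟩, ⟨F.pv + 40, F.pv + 44⟩] v.mem s.mem := by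
    rw [w_mem]
    refine Mem.SameExcept.step_writeLE' _ 4 _ (Mem.SameExcept.step_writeLE' _ 4 _ (Mem.SameExcept.refl _ _) ?_ ?_) ?_ ?_
    · omega
    · simp only [inSpans_cons, inSpans_nil]
      omega
    · omega
    · simp only [inSpans_cons, inSpans_nil]
      omega
  have hun : ShadowUntouched v.mem s.mem := by
    unfold Asan.ShadowUntouched
    apply hs.eqOn
    simp only [List.forall_mem_cons, List.not_mem_nil, false_imp_iff, implies_true, and_true]
    omega
  -- the fields of pv that the two stores leave alone
  have hrd : ∀ off : Nat, (off + 4 ≤ 32 ∨ 44 ≤ off) → off ≤ 100 → rd s.mem (F.pv + off) 4 = rd v.mem (F.pv + off) 4 := by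
    intro off h1 h2
    apply hs.rd (F.pv + off) 4 (by omega)
    simp only [List.forall_mem_cons, List.not_mem_nil, false_imp_iff, implies_true, and_true]
    omega
  -- the field `StackPtr` read back: the local StackPtr
  have hsp : rd s.mem (F.pv + 40) 4 = (v.reg .rbx).toNat := by
    rw [w_mem, rd_writeLE_same _ (v.reg .r14 + 40) 4 _ (F.pv + 40) e40 (by decide), toNat_part32]
    omega
  -- [LZ1-LZ6] of the new memory
  have hlz : LZOK s.mem F.pv := by
    obtain ⟨b1, b2, b3, b4, b5, b6, b7, b8, b9⟩ := hbody.lz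
    simp only [gfield] at b1 b2 b3 b4 b5 b6 b7 b8 b9
    have e8 := hrd 8 (by omega) (by omega)
    have e12 := hrd 12 (by omega) (by omega)
    have e16 := hrd 16 (by omega) (by omega)
    have e20 := hrd 20 (by omega) (by omega)
    have e24 := hrd 24 (by omega) (by omega)
    have e44 := hrd 44 (by omega) (by omega)
    refine ⟨?_, ?_, ?_, ?_, ?_, ?_, ?_, ?_, ?_⟩
    all_goals simp only [gfield]
    all_goals omega
  exact (hbody.carry_lz w_rip w_rsp w_eq habi hun hs (by dl_scratch) hlz).1

/-- **The test of l.888 was true** (`cmp ebp, eax ; jge` not taken; `h` is the walker's branch fact `hbr_106f83` as it stands):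
`i < LineLen`, for a register `x = rbp` that holds `i ≤ LineLen` and a `LineLen` that is a non-negative `int`. -/
theorem dl3_lt_of_branch (x : Word) (n : Nat) (hn : n < 2 ^ 31) (hx : x.toNat ≤ n)
    (h : ¬ (BitVec.ofNat 32 n).toInt ≤ (Word.part .w32 x).toInt) : x.toNat < n := by
  have e1 : (Word.part .w32 x).toInt = (x.toNat : Int) := part32_toInt_small x (by omega)
  have e2 : (BitVec.ofNat 32 n).toNat = n := toNat_ofNat32 n (by omega)
  have e3 : (BitVec.ofNat 32 n).toInt = (n : Int) := by
    rw [toInt_of_lt _ (by omega), e2]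
  rw [e1, e3] at h
  omega

/-- **At 106F98H (`ret33`), `DGifDecompressInput(GifFile, &CrntCode)` has returned** (the unit's own cut: the call's return address
is not a cut of the design): the register allocation of the main loop (`Main`: `ebx`, `ebp`, `r13`, `r14` are callee-saved), `i <
LineLen` (the test of l.888), the result in `eax` is a boolean, and GIF_OK means a 12-bit code in `CrntCode` and a measure below
`m`, the measure of the head. -/
structure dl3_AtRet (m : Nat) (H : Heap) (rest : List Obj) (frames : List (Nat × FrameLayout)) (F : Forest) (R : Rd) (n : Nat)
    (u₀ e : State) (ret : Word) (v : State) : Prop where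
  /-- `Body`, `Locals` and the registers of the main loop, at the return address -/
  main : DGifDecompressLine.Main Gif.L.DGifDecompressLine.ret33 H rest frames F R n u₀ e ret v
  /-- the test of l.888 -/
  lt : (v.reg .rbp).toNat < n
  /-- `eax` = GIF_OK or GIF_ERROR -/
  res : IsBool v
  /-- GIF_OK: `CrntCode ≤ 4095`, and the measure went down -/
  ok1 : (v.reg .rax).toNat = 1 → rd v.mem ((e.reg .rsp).toNat - 88) 4 ≤ 4095 ∧ mu R v.mem F.pv < m

/-- **106F7DH … 106F98H (`ret33`), and 106F7DH … 107080H … 10709DH** (dgif_lib.c:888-889, 999-1002). The test `i < LineLen`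
(`cmp ebp, [rsp+28H] ; jge`). False: the write-back `Private->LastCode = LastCode; Private->StackPtr = StackPtr`, the shadow index
back in `r15`, `eax = 1`: `Done`. True: `rsi = &CrntCode`, `rdi = GifFile`, the call of DGifDecompressInput: `dl3_AtRet`. -/
theorem dl3_seg_head (Lay : Layout) (hLay : Lay.hi = 0x1000000) (μ : Microarch) (hμ : UserX.MicroOK μ) (u₀ : State)
    (hcode : HasCodeNat Lay u₀ Gif.L.DGifDecompressLine.entry Gif.Code.code_DGifDecompressLine.nat Gif.L.DGifDecompressLine.size)
    (H : Heap) (rest : List Obj) (frames : List (Nat × FrameLayout)) (F : Forest) (R : Rd) (n m : Nat) (e : State) (ret : Word)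
    (h_DI : Calls Lay μ ProgX.Base.WayInv (ProgX.Base.conv u₀) Gif.L.DGifDecompressInput.entry
      (Gif.Spec.DGifDecompressInput.spec H rest (DGifDecompressLine.framesIn frames e) F R))
    (v : State) (hat : DGifDecompressLine.Head m H rest frames F R n u₀ e ret v) :
    ReachVia Lay μ ProgX.Base.WayInv v (fun w =>
      dl3_AtRet m H rest frames F R n u₀ e ret w ∨
      DGifDecompressLine.Done H rest frames F R n u₀ e ret w) := by
  obtain ⟨⟨hbody, hloc, h_r14, h_r13, h_rbx, h_rbp, h_w1⟩, h_mu⟩ := hat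
  -- 1. THE PRELUDE (the same in every segment of this function; Gif/Spec/LzwCarry.lean §2)
  have he := hbody.entry
  v_entry he
  have hgin := hbody.gif_inside
  have hpin := hbody.pv_inside
  have hn31 : n < 2 ^ 31 := hbody.len_lt
  have w_rip := hbody.rip
  have c_rsp : v.reg .rsp = e.reg .rsp - 200 := hbody.rsp
  have w_eq : Mem.EqOn ProgX.Base.L.textLo ProgX.Base.L.textHi u₀.mem v.mem := ProgX.Base.conv_code_eqOn hbody.code
  have hdf : v.flags .df = false := (show abiInv _ from hbody.abi).1
  have hmx : v.mxcsr &&& 0x1F80 = 0x1F80 := (show abiInv _ from hbody.abi).2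
  have hsse := ProgX.Base.sseOK_of_abiInv hbody.abi
  have w_kept : RegsKept [.rsp] v v := RegsKept.refl _ _
  -- 2. THE SLOTS THE SEGMENT READS: LineLen, GifFile, the shadow index, LastCode (any value)
  have k_len : v.mem.readLE (e.reg .rsp - 160) 4 = n := hbody.s_len
  have k_gif : v.mem.readLE (e.reg .rsp - 168) 8 = F.gif := hbody.s_gif
  have k_shadow : v.mem.readLE (e.reg .rsp - 128) 8 = ((e.reg .rsp - 120) >>> 3).toNat := hloc.s_shadow
  obtain ⟨lc, k_last⟩ : ∃ lc, v.mem.readLE (e.reg .rsp - 180) 4 = lc := ⟨_, rfl⟩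
  -- 3. THE WALK: both arms of the test of l.888, to the epilogue and through the call
  u_walk hcode [hμ.vendor]
    until [Gif.L.DGifDecompressLine.ret33, Gif.L.DGifDecompressLine.at_10709d]
    span [ProgX.Base.L.textLo, ProgX.Base.L.textHi] side (v_side)
  case call_inv =>
    v_inv
  case pre_106f93 =>
    -- l.889: the precondition of DGifDecompressInput
    exact dl3_call_pre hbody s_106f93 _ w_mem w_rsp w_rsi w_rdi
  · -- 0x10709d FROM 0x107096 (l.999-1002): `i ≥ LineLen`, the write-back, `eax = 1`: `Done`
    have habi : (conv u₀).inv s_107096 := by v_inv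
    have k_body := dl3_writeback (cut' := Gif.L.DGifDecompressLine.at_10709d) hbody h_r14 h_rbx s_107096 _ w_mem w_rip w_rsp
      w_eq habi
    refine ReachVia.done (Or.inr ⟨k_body, w_r15, ?_⟩)
    left
    rw [w_rax]
    decide
  · -- 0x106f98 (ret33): DGifDecompressInput has returned
    obtain ⟨k_body, k_loc, k_bool, k_ok1⟩ := dl3_after_call (cut' := Gif.L.DGifDecompressLine.ret33) hbody hloc s_106f93
      s_106f93r _ w_mem_106f93 w_rsp_106f93 w_rsi_106f93 w_same w_post w_rip w_rsp w_code w_inv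
    -- the test of l.888 was true
    have hlt : (v.reg .rbp).toNat < n := dl3_lt_of_branch (v.reg .rbp) n hn31 h_rbp hbr_106f83
    -- `Main`: the four registers are callee-saved
    have e_r14 : s_106f93r.reg .r14 = v.reg .r14 := w_kept.get .r14 rfl
    have e_r13 : s_106f93r.reg .r13 = v.reg .r13 := w_kept.get .r13 rfl
    have e_rbx : s_106f93r.reg .rbx = v.reg .rbx := w_kept.get .rbx rfl
    have e_rbp : s_106f93r.reg .rbp = v.reg .rbp := w_kept.get .rbp rfl
    refine ReachVia.done (Or.inl ⟨⟨k_body, k_loc, ?_, ?_, ?_, ?_, ?_⟩, ?_, k_bool, ?_⟩)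
    · rw [e_r14]
      exact h_r14
    · rw [e_r13]
      exact h_r13
    · rw [e_rbx]
      exact h_rbx
    · rw [e_rbp]
      exact h_rbp
    · rw [e_rbp, e_rbx]
      exact h_w1
    · rw [e_rbp]
      exact hlt
    · -- GIF_OK: below the measure of the head
      intro h1
      obtain ⟨hc, hm⟩ := k_ok1 h1
      refine ⟨hc, ?_⟩
      omega

/-- **106F98H (`ret33`) … 106FA0H, and 106F98H … 1070BAH … 10709DH** (dgif_lib.c:889-891, 1003). `test eax, eax ; je`. GIF_ERROR
(`eax = 0`): the shadow index back in `r15`, `eax = 0` still: `Done`. GIF_OK (`eax = 1`, the result is a boolean): `Decoded`: the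
test of l.888 was true, so `StackPtr = 0` (W1); `CrntCode ≤ 4095`; the measure is below the head's. Nothing is stored. -/
theorem dl3_seg_tail (Lay : Layout) (hLay : Lay.hi = 0x1000000) (μ : Microarch) (hμ : UserX.MicroOK μ) (u₀ : State)
    (hcode : HasCodeNat Lay u₀ Gif.L.DGifDecompressLine.entry Gif.Code.code_DGifDecompressLine.nat Gif.L.DGifDecompressLine.size)
    (H : Heap) (rest : List Obj) (frames : List (Nat × FrameLayout)) (F : Forest) (R : Rd) (n m : Nat) (e : State) (ret : Word)
    (v : State) (hat : dl3_AtRet m H rest frames F R n u₀ e ret v) :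
    ReachVia Lay μ ProgX.Base.WayInv v (fun w =>
      DGifDecompressLine.Decoded m H rest frames F R n u₀ e ret w ∨
      DGifDecompressLine.Done H rest frames F R n u₀ e ret w) := by
  obtain ⟨⟨hbody, hloc, h_r14, h_r13, h_rbx, h_rbp, h_w1⟩, h_lt, h_res, h_ok1⟩ := hat
  -- 1. THE PRELUDE
  have he := hbody.entry
  v_entry he
  have hgin := hbody.gif_inside
  have hpin := hbody.pv_inside
  have w_rip := hbody.rip
  have c_rsp : v.reg .rsp = e.reg .rsp - 200 := hbody.rsp
  have w_eq : Mem.EqOn ProgX.Base.L.textLo ProgX.Base.L.textHi u₀.mem v.mem := ProgX.Base.conv_code_eqOn hbody.code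
  have hdf : v.flags .df = false := (show abiInv _ from hbody.abi).1
  have hmx : v.mxcsr &&& 0x1F80 = 0x1F80 := (show abiInv _ from hbody.abi).2
  have hsse := ProgX.Base.sseOK_of_abiInv hbody.abi
  have w_kept : RegsKept [.rsp] v v := RegsKept.refl _ _
  -- `eax` as a variable `z` (the branch fact of `test eax, eax` speaks of it)
  obtain ⟨z, c_rax⟩ : ∃ z, v.reg .rax = z := ⟨_, rfl⟩
  have k_shadow : v.mem.readLE (e.reg .rsp - 128) 8 = ((e.reg .rsp - 120) >>> 3).toNat := hloc.s_shadow
  u_walk hcode [hμ.vendor]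
    until [Gif.L.DGifDecompressLine.at_106fa0, Gif.L.DGifDecompressLine.at_10709d]
    span [ProgX.Base.L.textLo, ProgX.Base.L.textHi] side (v_side)
  · -- 0x10709d FROM 0x1070bf (l.890 `return GIF_ERROR`): `eax = 0` as the callee left it: `Done`
    have habi : (conv u₀).inv s_1070bf := by v_inv
    have k_body := hbody.moved (cut' := Gif.L.DGifDecompressLine.at_10709d) w_rip w_rsp w_mem habi
    refine ReachVia.done (Or.inr ⟨k_body, w_r15, ?_⟩)
    unfold Gif.Spec.IsBool at h_res ⊢
    rw [w_kept.get .rax rfl]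
    exact h_res
  · -- 0x106fa0 (l.893): GIF_OK: `Decoded`
    -- the result is a boolean and not 0
    have h1 : (v.reg .rax).toNat = 1 := by
      unfold Gif.Spec.IsBool at h_res
      rcases h_res with h1 | h0
      · exact h1
      · exfalso
        apply hbr_106f9a
        rw [toNat_part32, ← c_rax, h0]
    obtain ⟨hc, hm⟩ := h_ok1 h1
    have habi : (conv u₀).inv s_106f9a := by v_inv
    have k_body := hbody.moved (cut' := Gif.L.DGifDecompressLine.at_106fa0) w_rip w_rsp w_mem habi
    have k_loc := hloc.moved w_mem
    -- the registers of the main loop are untouched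
    have e_r14 : s_106f9a.reg .r14 = v.reg .r14 := w_kept.get .r14 rfl
    have e_r13 : s_106f9a.reg .r13 = v.reg .r13 := w_kept.get .r13 rfl
    have e_rbx : s_106f9a.reg .rbx = v.reg .rbx := w_kept.get .rbx rfl
    have e_rbp : s_106f9a.reg .rbp = v.reg .rbp := w_kept.get .rbp rfl
    refine ReachVia.done (Or.inl ⟨⟨⟨k_body, k_loc, ?_, ?_, ?_, ?_, ?_⟩, ?_, ?_, ?_⟩, ?_⟩)
    · rw [e_r14]
      exact h_r14
    · rw [e_r13]
      exact h_r13
    · rw [e_rbx]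
      exact h_rbx
    · rw [e_rbp]
      exact h_rbp
    · rw [e_rbp, e_rbx]
      exact h_w1
    · -- `i < LineLen`
      rw [e_rbp]
      exact h_lt
    · -- W1: `StackPtr = 0`
      rw [e_rbx]
      exact h_w1 h_lt
    · -- the measure
      rw [w_mem]
      exact hm
    · -- `CrntCode ≤ 4095`
      rw [w_mem]
      exact hc

end Gif.Spec.DGifDecompressLine_3
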